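-- pv_equiv track=rewrite | github.com/PdxCodeGuild/20180116-FullStack-Day | Code/Eric/01 PYTHON/LAB 018 PEAKS & VALLEYS V1.py | valley_finder
-- ===== SOURCE A (Python) =====
-- def valley_finder(data):
-- 	valleys = []
-- 	valleys_i = []
-- 	for i in range(1, len(data) - 1):
-- 		previous = data[i - 1]
-- 		current = data[i]
-- 		next = data[i + 1]
-- 		if previous > current < next:
-- 			valleys_i.append(i)
-- 			valleys.append(current)
-- 	return valleys, valleys_i
-- ===== SOURCE B (Python) =====
-- def valley_finder(data):
--     # first-differences formulation: a valley is a sign change - then +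
--     d = [data[j + 1] - data[j] for j in range(len(data) - 1)]
--     valleys = []
--     valleys_i = []
--     for i in range(1, len(d)):
--         if d[i - 1] < 0 and d[i] > 0:
--             valleys.append(data[i])
--             valleys_i.append(i)
--     return valleys, valleys_i
-- ===== Notes on version B (the rewrite author's own statement) =====
-- stated objective: alternative
-- what changed: B first builds the first-differences array and detects a valley as a strict sign change (negative diff followed by positive diff), instead of A's three-point window comparison at each interior index.
import Mathlib
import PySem

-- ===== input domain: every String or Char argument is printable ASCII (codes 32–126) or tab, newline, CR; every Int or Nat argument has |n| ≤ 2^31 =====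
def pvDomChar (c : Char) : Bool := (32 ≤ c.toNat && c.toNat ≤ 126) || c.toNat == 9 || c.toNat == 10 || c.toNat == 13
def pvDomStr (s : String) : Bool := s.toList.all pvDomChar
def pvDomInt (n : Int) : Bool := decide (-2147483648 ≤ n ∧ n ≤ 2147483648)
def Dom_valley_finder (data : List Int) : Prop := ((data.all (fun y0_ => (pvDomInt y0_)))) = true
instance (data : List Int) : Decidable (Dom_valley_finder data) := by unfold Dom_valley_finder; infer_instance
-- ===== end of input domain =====

-- B detects valleys as a strict sign change in the first-differences array instead of A's three-point window; alternative decomposition, same return value.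


-- ===== PORT A =====
def valley_finder (data : List Int) : List Int × List Int :=
  (PySem.List.pyRange 1 ((data.length : Int) - 1) 1).foldl
    (fun (acc : List Int × List Int) i =>
      let previous := PySem.List.pyGetD data (i - 1) 0
      let current := PySem.List.pyGetD data i 0
      let next := PySem.List.pyGetD data (i + 1) 0
      if previous > current ∧ current < next then
        (acc.1 ++ [current], acc.2 ++ [i])
      else acc)
    ([], [])

-- ===== PORT B =====
def valley_finder_alt (data : List Int) : List Int × List Int :=
  let d := (PySem.List.pyRange 0 ((data.length : Int) - 1) 1).map
    (fun j => PySem.List.pyGetD data (j + 1) 0 - PySem.List.pyGetD data j 0)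
  (PySem.List.pyRange 1 (d.length : Int) 1).foldl
    (fun (acc : List Int × List Int) i =>
      if PySem.List.pyGetD d (i - 1) 0 < 0 ∧ PySem.List.pyGetD d i 0 > 0 then
        (acc.1 ++ [PySem.List.pyGetD data i 0], acc.2 ++ [i])
      else acc)
    ([], [])

-- ===== PRECONDITION & SPEC =====
def Spec_valley_finder (data : List Int) (out : List Int × List Int) : Prop := out = valley_finder_alt data
instance (data : List Int) (out : List Int × List Int) : Decidable (Spec_valley_finder data out) := by unfold Spec_valley_finder; infer_instance

-- ===== CLAIM (what is proved, stated in full; the proofs are below) =====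
def Claim_equal_valley_finder : Prop := ∀ (data : List Int), Dom_valley_finder data → Spec_valley_finder data (valley_finder data)

-- ===== LEMMAS AND PROOFS =====

theorem valley_finder_eq (data : List Int) : valley_finder data = valley_finder_alt data := by
  unfold valley_finder valley_finder_alt
  simp only
  by_cases h : (data.length : Int) ≤ 1
  · simp only [List.length_map, PySem.List.length_pyRange_one]
    rw [PySem.List.pyRange_one_eq_nil (by omega), PySem.List.pyRange_one_eq_nil (by omega), PySem.List.pyRange_one_eq_nil (by omega)]
    rfl
  · push Not at h
    have hL : (((PySem.List.pyRange 0 ((data.length : Int) - 1) 1).map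
        (fun j => PySem.List.pyGetD data (j + 1) 0 - PySem.List.pyGetD data j 0)).length : Int)
        = (data.length : Int) - 1 := by
      simp [List.length_map, PySem.List.length_pyRange_one]
      omega
    rw [hL]
    apply PySem.List.foldl_congr_mem
    intro acc i hi
    have hmem := (PySem.List.mem_pyRange_one).1 hi
    have h1 : PySem.List.pyGetD ((PySem.List.pyRange 0 ((data.length : Int) - 1) 1).map
        (fun j => PySem.List.pyGetD data (j + 1) 0 - PySem.List.pyGetD data j 0)) (i - 1) 0
        = PySem.List.pyGetD data i 0 - PySem.List.pyGetD data (i - 1) 0 := by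
      rw [PySem.List.pyGetD_map_pyRange_of_nonneg _ _ _ _ (by omega) (by omega)]
      ring_nf
    have h2 : PySem.List.pyGetD ((PySem.List.pyRange 0 ((data.length : Int) - 1) 1).map
        (fun j => PySem.List.pyGetD data (j + 1) 0 - PySem.List.pyGetD data j 0)) i 0
        = PySem.List.pyGetD data (i + 1) 0 - PySem.List.pyGetD data i 0 := by
      rw [PySem.List.pyGetD_map_pyRange_of_nonneg _ _ _ _ (by omega) (by omega)]
    simp only [h1, h2, gt_iff_lt, sub_neg, sub_pos]

-- ===== VERDICT (by name: the statement is the Claim_ definition above) =====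
theorem valley_finder_spec : Claim_equal_valley_finder := by
  intro data _
  unfold Spec_valley_finder
  exact valley_finder_eq data
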